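-- pv_equiv track=rewrite | github.com/tucker2331-design/bill-tracker | Test_api_2.py | get_best_committee_match
-- ===== SOURCE A (Python) =====
-- def get_best_committee_match(extracted_text, chamber_prefix, rosetta_keys):
--     """The Alias Matrix: Normalizes dirty CSV text and strictly maps to official IDs."""
--     if not extracted_text: return None
--
--     # Normalize the human text
--     ext_clean = extracted_text.lower().replace('&', 'and').replace('committee', '').strip()
--
--     # 1. Exact Match Check
--     for r_key in rosetta_keys:
--         r_clean = r_key.lower().replace('&', 'and').replace('committee', '').strip()
--         if ext_clean == r_clean or f"{chamber_prefix.lower()}{ext_clean}" == r_clean: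
--             return r_key
--
--     # 2. Strong Substring Check (Longest names first to prevent partial grabs)
--     for r_key in sorted(rosetta_keys, key=len, reverse=True):
--         # THE SHIELD: Explicitly block generic Black Hole IDs
--         if r_key.lower().strip() in ["house", "senate", "house floor", "senate floor"]:
--             continue
--
--         r_clean = r_key.replace(chamber_prefix, '').lower().replace('&', 'and').replace('committee', '').strip()
--
--         # If the cleaned extracted text is a strong match for the official base name
--         if r_clean and (r_clean in ext_clean or ext_clean in r_clean):
--             if r_key.startswith(chamber_prefix):
--                 return r_key
--
--     return None
-- ===== SOURCE B (Python) =====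
-- def _clean(s):
--     return s.replace('&', 'and').replace('committee', '').strip()
--
-- def get_best_committee_match(extracted_text, chamber_prefix, rosetta_keys):
--     """Alias Matrix rewrite: exact pass via next(), then a single best-candidate
--     scan instead of sorting by length."""
--     if not extracted_text:
--         return None
--     ext_clean = _clean(extracted_text.lower())
--     pref_l = chamber_prefix.lower()
--
--     # 1. Exact match
--     exact = next((k for k in rosetta_keys
--                   if _clean(k.lower()) in (ext_clean, pref_l + ext_clean)), None)
--     if exact is not None:
--         return exact
--
--     # 2. Longest strong-substring candidate in one pass (strict > keeps the
--     #    earliest key at maximal length, matching the stable reverse sort).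
--     best = None
--     for k in rosetta_keys:
--         if k.lower().strip() in ("house", "senate", "house floor", "senate floor"):
--             continue
--         if not k.startswith(chamber_prefix):
--             continue
--         kc = _clean(k.replace(chamber_prefix, '').lower())
--         if kc and (kc in ext_clean or ext_clean in kc) and (best is None or len(k) > len(best)):
--             best = k
--     return best
-- ===== Notes on version B (the rewrite author's own statement) =====
-- stated objective: faster
-- what changed: Phase 2 no longer sorts the keys by length and returns the first match; B makes a single pass over rosetta_keys keeping the best matching candidate, replacing it only on strictly greater length (which reproduces the stable reverse-sort tie-breaking); phase 1 becomes a next() over a generator.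
import Mathlib
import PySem

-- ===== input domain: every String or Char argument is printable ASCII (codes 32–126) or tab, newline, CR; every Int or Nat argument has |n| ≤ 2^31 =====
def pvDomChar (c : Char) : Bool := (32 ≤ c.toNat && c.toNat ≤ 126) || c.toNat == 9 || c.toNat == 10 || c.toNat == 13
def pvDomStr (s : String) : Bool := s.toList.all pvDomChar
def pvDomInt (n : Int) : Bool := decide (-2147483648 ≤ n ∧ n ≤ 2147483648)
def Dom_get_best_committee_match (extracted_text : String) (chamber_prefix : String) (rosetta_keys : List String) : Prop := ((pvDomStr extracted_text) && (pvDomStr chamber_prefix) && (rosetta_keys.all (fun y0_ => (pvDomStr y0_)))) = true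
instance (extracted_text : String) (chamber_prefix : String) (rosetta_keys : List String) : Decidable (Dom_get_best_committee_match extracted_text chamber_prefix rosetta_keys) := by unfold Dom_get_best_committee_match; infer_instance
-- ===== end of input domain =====

-- B replaces A's phase-2 "sort by length descending, return first match" by a single
-- best-candidate scan with strict tie-breaking; a timing run measured B faster (no sort).


-- ===== PORT A =====
-- phase-1 loop of A: return the first key whose cleaned lowercase form matches exactly
def pvLoop1A (ext_clean : String) (pref_l : String) : List String → Option String
  | [] => none
  | r_key :: rest =>
    let r_clean := PySem.Str.strip (PySem.Str.replace (PySem.Str.replace (PySem.Str.lower r_key) "&" "and") "committee" "")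
    if r_clean == ext_clean || r_clean == pref_l ++ ext_clean then some r_key
    else pvLoop1A ext_clean pref_l rest

-- phase-2 loop of A, run over the length-descending sorted key list
def pvLoop2A (ext_clean : String) (chamber_prefix : String) : List String → Option String
  | [] => none
  | r_key :: rest =>
    if PySem.Str.strip (PySem.Str.lower r_key) ∈ (["house", "senate", "house floor", "senate floor"] : List String) then
      pvLoop2A ext_clean chamber_prefix rest
    else
      let r_clean := PySem.Str.strip (PySem.Str.replace (PySem.Str.replace (PySem.Str.lower (PySem.Str.replace r_key chamber_prefix "")) "&" "and") "committee" "")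
      if !(r_clean == "") && (PySem.Str.isIn r_clean ext_clean || PySem.Str.isIn ext_clean r_clean) then
        if PySem.Str.startswith r_key chamber_prefix then some r_key
        else pvLoop2A ext_clean chamber_prefix rest
      else pvLoop2A ext_clean chamber_prefix rest

def get_best_committee_match (extracted_text : String) (chamber_prefix : String) (rosetta_keys : List String) : Option String :=
  if extracted_text == "" then none
  else
    let ext_clean := PySem.Str.strip (PySem.Str.replace (PySem.Str.replace (PySem.Str.lower extracted_text) "&" "and") "committee" "")
    match pvLoop1A ext_clean (PySem.Str.lower chamber_prefix) rosetta_keys with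
    | some r_key => some r_key
    | none => pvLoop2A ext_clean chamber_prefix (PySem.List.sorted rosetta_keys PySem.Str.len true)

-- ===== PORT B =====
-- _clean of Source B
def pvClean (s : String) : String :=
  PySem.Str.strip (PySem.Str.replace (PySem.Str.replace s "&" "and") "committee" "")

-- one step of Source B's single best-candidate scan (strict > on length)
def pvStepB (ext_clean : String) (chamber_prefix : String) (best : Option String) (k : String) : Option String :=
  if PySem.Str.strip (PySem.Str.lower k) ∈ (["house", "senate", "house floor", "senate floor"] : List String) then best
  else if !(PySem.Str.startswith k chamber_prefix) then best
  else
    let kc := pvClean (PySem.Str.lower (PySem.Str.replace k chamber_prefix ""))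
    if !(kc == "") && (PySem.Str.isIn kc ext_clean || PySem.Str.isIn ext_clean kc) &&
        (match best with | none => true | some b => decide (PySem.Str.len b < PySem.Str.len k)) then
      some k
    else best

def get_best_committee_match_alt (extracted_text : String) (chamber_prefix : String) (rosetta_keys : List String) : Option String :=
  if extracted_text == "" then none
  else
    let ext_clean := pvClean (PySem.Str.lower extracted_text)
    let pref_l := PySem.Str.lower chamber_prefix
    match rosetta_keys.find? (fun k =>
        let rc := pvClean (PySem.Str.lower k)
        rc == ext_clean || rc == pref_l ++ ext_clean) with
    | some k => some k
    | none => rosetta_keys.foldl (pvStepB ext_clean chamber_prefix) none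

-- ===== PRECONDITION & SPEC =====
def Spec_get_best_committee_match (extracted_text : String) (chamber_prefix : String) (rosetta_keys : List String) (out : Option String) : Prop := out = get_best_committee_match_alt extracted_text chamber_prefix rosetta_keys
instance (extracted_text : String) (chamber_prefix : String) (rosetta_keys : List String) (out : Option String) : Decidable (Spec_get_best_committee_match extracted_text chamber_prefix rosetta_keys out) := by unfold Spec_get_best_committee_match; infer_instance

-- ===== CLAIM (what is proved, stated in full; the proofs are below) =====
def Claim_equal_get_best_committee_match : Prop := ∀ (extracted_text : String) (chamber_prefix : String) (rosetta_keys : List String), Dom_get_best_committee_match extracted_text chamber_prefix rosetta_keys → Spec_get_best_committee_match extracted_text chamber_prefix rosetta_keys (get_best_committee_match extracted_text chamber_prefix rosetta_keys)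

-- ===== LEMMAS AND PROOFS =====

-- fold the shared cleaning chain into pvClean (definitional)
theorem pvClean_fold (s : String) :
    PySem.Str.strip (PySem.Str.replace (PySem.Str.replace s "&" "and") "committee" "") = pvClean s := rfl

-- A's phase-2 predicate (not blocked, strong substring match, chamber prefix), one Bool
def pvQ (ec cp k : String) : Bool :=
  !(decide (PySem.Str.strip (PySem.Str.lower k) ∈ (["house", "senate", "house floor", "senate floor"] : List String))) &&
  (!(pvClean (PySem.Str.lower (PySem.Str.replace k cp "")) == "") &&
    (PySem.Str.isIn (pvClean (PySem.Str.lower (PySem.Str.replace k cp ""))) ec ||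
     PySem.Str.isIn ec (pvClean (PySem.Str.lower (PySem.Str.replace k cp ""))))) &&
  PySem.Str.startswith k cp

-- "strictly better than the current best" (generic in the key)
def pvBetter {α : Type} (key : α → Int) (best : Option α) (x : α) : Bool :=
  match best with
  | none => true
  | some m => decide (key m < key x)

theorem pvLoop1A_eq_find? (ec pl : String) (l : List String) :
    pvLoop1A ec pl l = l.find? (fun k =>
      let rc := pvClean (PySem.Str.lower k)
      rc == ec || rc == pl ++ ec) := by
  induction l with
  | nil => rfl
  | cons k rest ih =>
    simp only [pvLoop1A, pvClean_fold]
    by_cases h1 : (pvClean (PySem.Str.lower k) == ec || pvClean (PySem.Str.lower k) == pl ++ ec) = true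
    · rw [if_pos h1,
        List.find?_cons_of_pos (p := fun k => let rc := pvClean (PySem.Str.lower k); rc == ec || rc == pl ++ ec) h1]
    · rw [if_neg h1,
        List.find?_cons_of_neg (p := fun k => let rc := pvClean (PySem.Str.lower k); rc == ec || rc == pl ++ ec) h1, ih]

theorem pvLoop2A_eq_find? (ec cp : String) (l : List String) :
    pvLoop2A ec cp l = l.find? (pvQ ec cp) := by
  induction l with
  | nil => rfl
  | cons k rest ih =>
    simp only [pvLoop2A, pvClean_fold]
    by_cases hb : PySem.Str.strip (PySem.Str.lower k) ∈ (["house", "senate", "house floor", "senate floor"] : List String)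
    · rw [if_pos hb, ih,
        List.find?_cons_of_neg (p := pvQ ec cp) (by
          simp only [pvQ, decide_eq_true hb, Bool.not_true, Bool.false_and]
          exact Bool.false_ne_true)]
    · rw [if_neg hb]
      by_cases hc : (!(pvClean (PySem.Str.lower (PySem.Str.replace k cp "")) == "") &&
          (PySem.Str.isIn (pvClean (PySem.Str.lower (PySem.Str.replace k cp ""))) ec ||
           PySem.Str.isIn ec (pvClean (PySem.Str.lower (PySem.Str.replace k cp ""))))) = true
      · rw [if_pos hc]
        cases hs : PySem.Str.startswith k cp with
        | true =>
          rw [if_pos rfl,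
            List.find?_cons_of_pos (p := pvQ ec cp) (by
              simp only [pvQ, decide_eq_false hb, Bool.not_false, Bool.true_and, hc, hs, Bool.and_true])]
        | false =>
          rw [if_neg Bool.false_ne_true, ih,
            List.find?_cons_of_neg (p := pvQ ec cp) (by
              simp only [pvQ, hs, Bool.and_false]
              exact Bool.false_ne_true)]
      · rw [if_neg hc, ih,
          List.find?_cons_of_neg (p := pvQ ec cp) (by
            intro h
            simp only [pvQ, Bool.and_eq_true] at h
            exact hc (by simp only [Bool.and_eq_true]; exact h.1.2))]

theorem pvStepB_eq (ec cp : String) (best : Option String) (k : String) :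
    pvStepB ec cp best k = if pvQ ec cp k && pvBetter PySem.Str.len best k then some k else best := by
  cases best with
  | none =>
    simp only [pvStepB, pvBetter, Bool.and_true]
    by_cases hb : PySem.Str.strip (PySem.Str.lower k) ∈ (["house", "senate", "house floor", "senate floor"] : List String)
    · rw [if_pos hb, if_neg (by
        simp only [pvQ, decide_eq_true hb, Bool.not_true, Bool.false_and]
        exact Bool.false_ne_true)]
    · rw [if_neg hb]
      cases hs : PySem.Str.startswith k cp with
      | false =>
        rw [if_pos (show (!false) = true from rfl), if_neg (by
          simp only [pvQ, hs, Bool.and_false]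
          exact Bool.false_ne_true)]
      | true =>
        rw [if_neg (by simp), show pvQ ec cp k =
            (!(pvClean (PySem.Str.lower (PySem.Str.replace k cp "")) == "") &&
              (PySem.Str.isIn (pvClean (PySem.Str.lower (PySem.Str.replace k cp ""))) ec ||
               PySem.Str.isIn ec (pvClean (PySem.Str.lower (PySem.Str.replace k cp ""))))) from by
          simp only [pvQ, decide_eq_false hb, Bool.not_false, Bool.true_and, hs, Bool.and_true]]
  | some b =>
    simp only [pvStepB, pvBetter]
    by_cases hb : PySem.Str.strip (PySem.Str.lower k) ∈ (["house", "senate", "house floor", "senate floor"] : List String)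
    · rw [if_pos hb, if_neg (by
        simp only [pvQ, decide_eq_true hb, Bool.not_true, Bool.false_and]
        exact Bool.false_ne_true)]
    · rw [if_neg hb]
      cases hs : PySem.Str.startswith k cp with
      | false =>
        rw [if_pos (show (!false) = true from rfl), if_neg (by
          simp only [pvQ, hs, Bool.and_false, Bool.false_and]
          exact Bool.false_ne_true)]
      | true =>
        rw [if_neg (by simp), show pvQ ec cp k =
            (!(pvClean (PySem.Str.lower (PySem.Str.replace k cp "")) == "") &&
              (PySem.Str.isIn (pvClean (PySem.Str.lower (PySem.Str.replace k cp ""))) ec ||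
               PySem.Str.isIn ec (pvClean (PySem.Str.lower (PySem.Str.replace k cp ""))))) from by
          simp only [pvQ, decide_eq_false hb, Bool.not_false, Bool.true_and, hs, Bool.and_true]]
        rfl

-- insertBy with the reverse comparator keeps the list key-descending
theorem pvInsertBy_pairwise {α : Type} (key : α → Int) (x : α) (l : List α)
    (h : l.Pairwise (fun a b => key b ≤ key a)) :
    (PySem.List.insertBy (fun a b => decide (key b < key a)) x l).Pairwise
      (fun a b => key b ≤ key a) := by
  induction l with
  | nil => simp [PySem.List.insertBy]
  | cons y ys ih =>
    rcases List.pairwise_cons.mp h with ⟨hy, hys⟩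
    simp only [PySem.List.insertBy]
    by_cases hlt : key y < key x
    · rw [if_pos (by simp [hlt])]
      refine List.pairwise_cons.mpr ⟨?_, h⟩
      intro z hz
      rcases List.mem_cons.mp hz with rfl | hz
      · exact le_of_lt hlt
      · exact le_trans (hy z hz) (le_of_lt hlt)
    · rw [if_neg (by simp [hlt])]
      refine List.pairwise_cons.mpr ⟨?_, ih hys⟩
      intro z hz
      rcases (PySem.List.mem_insertBy _ x z ys).mp hz with rfl | hz
      · exact le_of_not_gt hlt
      · exact hy z hz

-- core invariant: first match of the insertion = strict-best update of the first match
theorem pvFind?_insertBy {α : Type} (q : α → Bool) (key : α → Int) (x : α) (l : List α)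
    (h : l.Pairwise (fun a b => key b ≤ key a)) :
    (PySem.List.insertBy (fun a b => decide (key b < key a)) x l).find? q =
      if q x && pvBetter key (l.find? q) x then some x else l.find? q := by
  induction l with
  | nil =>
    simp only [PySem.List.insertBy, List.find?, pvBetter, Bool.and_true]
    cases hqx : q x <;> simp
  | cons y ys ih =>
    rcases List.pairwise_cons.mp h with ⟨hy, hys⟩
    simp only [PySem.List.insertBy]
    by_cases hlt : key y < key x
    · rw [if_pos (by simp [hlt])]
      cases hqx : q x with
      | false =>
        rw [List.find?_cons_of_neg (by simp [hqx])]
        simp only [hqx, Bool.false_and, Bool.false_eq_true, if_false]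
      | true =>
        rw [List.find?_cons_of_pos hqx]
        cases hqy : q y with
        | true =>
          rw [List.find?_cons_of_pos hqy]
          simp [pvBetter, hlt, hqx]
        | false =>
          rw [List.find?_cons_of_neg (by simp [hqy])]
          cases hfy : ys.find? q with
          | none => simp [pvBetter, hqx]
          | some m =>
            have hm : m ∈ ys := List.mem_of_find?_eq_some hfy
            have hml : key m ≤ key y := hy m hm
            simp [pvBetter, hqx, lt_of_le_of_lt hml hlt]
    · rw [if_neg (by simp [hlt])]
      cases hqy : q y with
      | false =>
        rw [List.find?_cons_of_neg (by simp [hqy]), List.find?_cons_of_neg (by simp [hqy]), ih hys]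
      | true =>
        rw [List.find?_cons_of_pos hqy, List.find?_cons_of_pos hqy]
        simp only [pvBetter]
        cases hqx : q x <;> simp [hlt]

-- fold the invariant over the whole insertion sort
theorem pvFind?_foldl_insertBy {α : Type} (q : α → Bool) (key : α → Int)
    (keys : List α) (l : List α)
    (h : l.Pairwise (fun a b => key b ≤ key a)) :
    (keys.foldl (fun acc x => PySem.List.insertBy (fun a b => decide (key b < key a)) x acc) l).find? q =
      keys.foldl (fun best k => if q k && pvBetter key best k then some k else best) (l.find? q) := by
  induction keys generalizing l with
  | nil => rfl
  | cons x rest ih =>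
    simp only [List.foldl_cons]
    rw [ih _ (pvInsertBy_pairwise key x l h), pvFind?_insertBy q key x l h]

theorem pvPhase2_eq (ec cp : String) (keys : List String) :
    pvLoop2A ec cp (PySem.List.sorted keys PySem.Str.len true) =
      keys.foldl (pvStepB ec cp) none := by
  rw [pvLoop2A_eq_find?, PySem.List.sorted_rev_eq_foldl_insertBy,
    pvFind?_foldl_insertBy (pvQ ec cp) PySem.Str.len keys [] List.Pairwise.nil]
  exact (List.foldl_ext _ _ none (fun best k _ => (pvStepB_eq ec cp best k).symm))

-- ===== VERDICT (by name: the statement is the Claim_ definition above) =====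
theorem get_best_committee_match_spec : Claim_equal_get_best_committee_match := by
  intro extracted_text chamber_prefix rosetta_keys _
  unfold Spec_get_best_committee_match
  simp only [get_best_committee_match, get_best_committee_match_alt, pvClean_fold]
  by_cases he : (extracted_text == "") = true
  · rw [if_pos he, if_pos he]
  · rw [if_neg he, if_neg he]
    rw [pvLoop1A_eq_find? (pvClean (PySem.Str.lower extracted_text)) (PySem.Str.lower chamber_prefix) rosetta_keys]
    cases h1 : rosetta_keys.find? (fun k =>
        let rc := pvClean (PySem.Str.lower k)
        rc == pvClean (PySem.Str.lower extracted_text) ||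
        rc == PySem.Str.lower chamber_prefix ++ pvClean (PySem.Str.lower extracted_text)) with
    | some k => rfl
    | none => exact pvPhase2_eq (pvClean (PySem.Str.lower extracted_text)) chamber_prefix rosetta_keys
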